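-- pv_equiv track=rewrite | github.com/AllenHD/unity-res-ref | src/parsers/scene_parser.py | _find_property_path
-- ===== SOURCE A (Python) =====
-- def _find_property_path(content: str, position: int) -> str:
--     """查找引用所在的属性路径
--
--     Args:
--         content: 文件内容
--         position: 引用在文件中的位置
--
--     Returns:
--         属性路径字符串
--     """
--     # 向前查找属性名
--     before_content = content[:position]
--     lines = before_content.split('\n')
--
--     for i in range(len(lines) - 1, -1, -1):
--         line = lines[i].strip()
--         if line and ':' in line and not line.startswith('#'):
--             # 提取属性名
--             property_name = line.split(':')[0].strip()
--             if property_name and not property_name.startswith('{'):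
--                 return property_name
--
--     return "unknown"
-- ===== SOURCE B (Python) =====
-- def _update(result, buf):
--     """Fold one completed line into the running answer: if the line declares a
--     property, that name becomes the new answer, otherwise keep the old one."""
--     line = ''.join(buf).strip()
--     if not line or line.startswith('#'):
--         return result
--     head, sep, _tail = line.partition(':')
--     if not sep:
--         return result
--     name = head.strip()
--     if name and not name.startswith('{'):
--         return name
--     return result
--
--
-- def _find_property_path(content: str, position: int) -> str:
--     # Single forward character scan: accumulate the current line in a buffer,
--     # fold each completed line into the answer, so the last match (= nearest
--     # preceding property name) survives.  No split(), no line list.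
--     result = "unknown"
--     buf = []
--     for ch in content[:position]:
--         if ch == '\n':
--             result = _update(result, buf)
--             buf = []
--         else:
--             buf.append(ch)
--     return _update(result, buf)
-- ===== Notes on version B (the rewrite author's own statement) =====
-- stated objective: alternative
-- what changed: Replaces A's split-into-lines plus backward index loop with early return by a single forward character scan that buffers the current line and folds each completed line into an accumulator via str.partition, so no line list is ever built and the last match (= nearest preceding) is returned.
import Mathlib
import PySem

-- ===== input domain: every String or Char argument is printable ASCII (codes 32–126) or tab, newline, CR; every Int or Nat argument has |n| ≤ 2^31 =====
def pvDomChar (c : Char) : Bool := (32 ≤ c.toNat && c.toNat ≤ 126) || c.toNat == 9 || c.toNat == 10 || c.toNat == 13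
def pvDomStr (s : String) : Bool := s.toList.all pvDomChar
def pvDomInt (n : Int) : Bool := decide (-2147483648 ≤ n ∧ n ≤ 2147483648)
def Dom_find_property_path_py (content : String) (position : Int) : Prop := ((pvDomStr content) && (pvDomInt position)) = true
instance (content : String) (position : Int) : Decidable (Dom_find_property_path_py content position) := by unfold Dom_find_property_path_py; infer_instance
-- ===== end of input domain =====

-- B replaces A's split-into-lines + backward early-return loop by a single forward
-- character scan with a line buffer and an overwrite accumulator (alternative, same cost).

-- ===== PORT A =====
-- backward loop `for i in range(len(lines)-1,-1,-1)` with early return, as recursion over the reversed line list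
def pvFindA : List (List Char) → String
  | [] => "unknown"
  | l :: rest =>
    let line := PySem.Chars.strip l
    if !line.isEmpty && PySem.Chars.isIn [':'] line && !PySem.Chars.startswith line ['#'] then
      let property_name := PySem.Chars.strip ((PySem.Chars.splitOn line [':']).headD [])
      if !property_name.isEmpty && !PySem.Chars.startswith property_name ['{'] then
        String.ofList property_name
      else pvFindA rest
    else pvFindA rest

def find_property_path_py (content : String) (position : Int) : String :=
  let before_content := PySem.Chars.slice content.toList none (some position)
  let lines := PySem.Chars.splitOn before_content ['\n']
  pvFindA lines.reverse

-- ===== PORT B =====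
-- `_update(result, buf)`: `partition(':')` on a 1-char separator is takeWhile/dropWhile
-- (head = part before the first ':'; `not sep` = no ':' found, exact for a single char)
def pvUpdate (result buf : List Char) : List Char :=
  let line := PySem.Chars.strip buf
  if line.isEmpty || PySem.Chars.startswith line ['#'] then result
  else
    let head := line.takeWhile (fun c => !(c == ':'))
    let sep := line.dropWhile (fun c => !(c == ':'))
    if sep.isEmpty then result
    else
      let name := PySem.Chars.strip head
      if !name.isEmpty && !PySem.Chars.startswith name ['{'] then name else result

-- the body of B's `for ch in …` loop: state = (result, buf)
def pvStep (st : List Char × List Char) (c : Char) : List Char × List Char :=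
  if c == '\n' then (pvUpdate st.1 st.2, []) else (st.1, st.2 ++ [c])

def find_property_path_py_alt (content : String) (position : Int) : String :=
  let st := (PySem.Chars.slice content.toList none (some position)).foldl pvStep ("unknown".toList, [])
  String.ofList (pvUpdate st.1 st.2)

-- ===== PRECONDITION & SPEC =====
def Spec_find_property_path_py (content : String) (position : Int) (out : String) : Prop := out = find_property_path_py_alt content position
instance (content : String) (position : Int) (out : String) : Decidable (Spec_find_property_path_py content position out) := by unfold Spec_find_property_path_py; infer_instance

-- ===== CLAIM =====
def Claim_equal_find_property_path_py : Prop := ∀ (content : String) (position : Int), Dom_find_property_path_py content position → Spec_find_property_path_py content position (find_property_path_py content position)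

-- ===== LEMMAS AND PROOFS =====

-- PySem's fuelled splitOn on a 1-char separator is Mathlib's List.splitOn
lemma pv_go_eq (c : Char) : ∀ (fuel : Nat) (l cur : List Char) (acc : List (List Char)),
    l.length ≤ fuel →
    PySem.Chars.splitOn.go [c] fuel l cur acc
      = acc.reverse ++ (List.splitOn c l).modifyHead (cur.reverse ++ ·) := by
  intro fuel
  induction fuel with
  | zero =>
    intro l cur acc h
    have : l = [] := List.length_eq_zero_iff.mp (Nat.le_zero.mp h)
    subst this
    simp [PySem.Chars.splitOn.go, List.splitOn, List.splitOnP_nil]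
  | succ f ih =>
    intro l cur acc h
    cases l with
    | nil => simp [PySem.Chars.splitOn.go, List.splitOn, List.splitOnP_nil]
    | cons x rest =>
      rw [PySem.Chars.splitOn.go]
      by_cases hx : x = c
      · subst hx
        have hpre : List.isPrefixOf [x] (x :: rest) = true := by
          simp [List.isPrefixOf]
        rw [if_pos hpre]
        simp only [List.length_cons, List.length_nil, Nat.zero_add, List.drop_succ_cons,
          List.drop_zero]
        rw [ih rest [] _ (by simpa using h)]
        simp [List.splitOn, List.splitOnP_cons]
        exact congrFun List.modifyHead_id _
      · have hpre : List.isPrefixOf [c] (x :: rest) = false := by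
          simp [List.isPrefixOf]
          exact fun hc => (hx hc.symm).elim
        rw [if_neg (by simp [hpre])]
        rw [ih rest (x :: cur) _ (by simpa using h)]
        have hsplit : List.splitOn c (x :: rest)
            = (List.splitOn c rest).modifyHead (List.cons x) := by
          simp [List.splitOn, List.splitOnP_cons, beq_iff_eq, hx]
        rw [hsplit, List.modifyHead_modifyHead]
        congr 1
        congr 1
        funext t
        simp

lemma pv_splitOn_bridge (c : Char) (cs : List Char) :
    PySem.Chars.splitOn cs [c] = List.splitOn c cs := by
  unfold PySem.Chars.splitOn
  rw [pv_go_eq c (cs.length + 1) cs [] [] (by omega)]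
  simp
  exact congrFun List.modifyHead_id _

-- A's per-line extraction, as an Option-valued helper (proof-side only)
def pvPropA (l : List Char) : Option (List Char) :=
  let line := PySem.Chars.strip l
  if !line.isEmpty && PySem.Chars.isIn [':'] line && !PySem.Chars.startswith line ['#'] then
    let property_name := PySem.Chars.strip ((PySem.Chars.splitOn line [':']).headD [])
    if !property_name.isEmpty && !PySem.Chars.startswith property_name ['{'] then
      some property_name
    else none
  else none

lemma pvFindA_cons (l : List Char) (rest : List (List Char)) :
    pvFindA (l :: rest) = match pvPropA l with
      | some n => String.ofList n
      | none => pvFindA rest := by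
  simp only [pvFindA, pvPropA]
  split_ifs <;> rfl

lemma pvFindA_eq_foldl (ls : List (List Char)) :
    pvFindA ls.reverse
      = String.ofList (ls.foldl (fun acc l => (pvPropA l).getD acc) "unknown".toList) := by
  induction ls using List.reverseRecOn with
  | nil => rfl
  | append_singleton ls x ih =>
    rw [List.reverse_append, List.reverse_singleton, List.singleton_append, pvFindA_cons,
      List.foldl_append, List.foldl_cons, List.foldl_nil]
    cases h : pvPropA x with
    | none => simp [ih]
    | some n => simp

-- headD of splitOn is takeWhile (the `head` of partition)
lemma pv_headD_splitOn (c : Char) (l : List Char) :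
    (List.splitOn c l).headD [] = l.takeWhile (fun x => !(x == c)) := by
  induction l with
  | nil => simp [List.splitOn, List.splitOnP_nil]
  | cons x rest ih =>
    by_cases hx : x = c
    · subst hx
      simp [List.splitOn, List.splitOnP_cons, List.takeWhile]
    · have hne : List.splitOn c rest ≠ [] := List.splitOnP_ne_nil _ _
      obtain ⟨h₀, t, hht⟩ := List.exists_cons_of_ne_nil hne
      have hsplit : List.splitOn c (x :: rest)
          = (List.splitOn c rest).modifyHead (List.cons x) := by
        simp [List.splitOn, List.splitOnP_cons, hx]
      rw [hsplit, hht]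
      rw [hht] at ih
      simp only [List.modifyHead, List.headD] at ih ⊢
      rw [List.takeWhile_cons]
      simp [hx, ih]

-- the colon test: `':' in line` = the partition separator is nonempty
lemma pv_isIn_colon (line : List Char) :
    PySem.Chars.isIn [':'] line = !(line.dropWhile (fun c => !(c == ':'))).isEmpty := by
  by_cases h : ':' ∈ line
  · have h1 : PySem.Chars.isIn [':'] line = true :=
      (PySem.Chars.isIn_iff_infix _ _).mpr ((List.singleton_infix_iff ':' line).mpr h)
    rw [h1]
    have h2 : line.dropWhile (fun c => !(c == ':')) ≠ [] := by
      intro hnil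
      have := List.dropWhile_eq_nil_iff.mp hnil ':' h
      simp at this
    simp [h2]
  · have h1 : PySem.Chars.isIn [':'] line = false := by
      rw [← Bool.not_eq_true, PySem.Chars.isIn_iff_infix]
      exact fun hinf => h ((List.singleton_infix_iff ':' line).mp hinf)
    have h2 : line.dropWhile (fun c => !(c == ':')) = [] :=
      List.dropWhile_eq_nil_iff.mpr (fun x hx => by
        simp only [Bool.not_eq_eq_eq_not, Bool.not_true, beq_eq_false_iff_ne]
        exact fun hxc => h (hxc ▸ hx))
    simp [h1, h2]

-- per line: B's fold step computes A's extraction with `getD`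
lemma pv_update_eq (r l : List Char) :
    pvUpdate r l = (pvPropA l).getD r := by
  simp only [pvUpdate, pvPropA]
  rw [pv_splitOn_bridge, pv_headD_splitOn, pv_isIn_colon]
  by_cases h1 : (PySem.Chars.strip l).isEmpty <;>
    by_cases h2 : PySem.Chars.startswith (PySem.Chars.strip l) ['#'] <;>
      by_cases h3 : ((PySem.Chars.strip l).dropWhile (fun c => !(c == ':'))).isEmpty <;>
        (simp [h1, h2, h3]; try (split <;> simp))

-- the forward character scan folds `pvUpdate` over the lines of (buf ++ cs)
lemma pv_scan_eq (cs : List Char) : ∀ (r b : List Char),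
    (let st := cs.foldl pvStep (r, b); pvUpdate st.1 st.2)
      = List.foldl (fun acc l => pvUpdate acc l) r ((List.splitOn '\n' cs).modifyHead (b ++ ·)) := by
  induction cs with
  | nil =>
    intro r b
    simp [List.splitOn, List.splitOnP_nil]
  | cons c cs ih =>
    intro r b
    by_cases hc : c = '\n'
    · subst hc
      have hne : List.splitOnP (fun a => a == '\n') cs ≠ [] := List.splitOnP_ne_nil _ _
      obtain ⟨h₀, t, hht⟩ := List.exists_cons_of_ne_nil hne
      simp only [List.foldl_cons, pvStep, beq_self_eq_true, if_true]
      rw [ih (pvUpdate r b) []]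
      simp [List.splitOn, List.splitOnP_cons, hht]
    · have hsplit : List.splitOn '\n' (c :: cs)
          = (List.splitOn '\n' cs).modifyHead (List.cons c) := by
        simp [List.splitOn, List.splitOnP_cons, beq_iff_eq, hc]
      simp only [List.foldl_cons, pvStep, beq_iff_eq, hc, if_false]
      rw [ih r (b ++ [c]), hsplit, List.modifyHead_modifyHead]
      congr 2
      funext t
      simp

-- ===== VERDICT =====
theorem find_property_path_py_spec : Claim_equal_find_property_path_py := by
  intro content position _
  simp only [Spec_find_property_path_py, find_property_path_py, find_property_path_py_alt]
  rw [pv_splitOn_bridge, pvFindA_eq_foldl]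
  have := pv_scan_eq (PySem.Chars.slice content.toList none (some position))
    "unknown".toList []
  simp only [] at this
  rw [this]
  have hid : (fun x : List Char => [] ++ x) = id := by funext t; simp
  rw [hid, List.modifyHead_id, id_eq]
  have hfun : (fun (acc l : List Char) => pvUpdate acc l)
      = (fun (acc l : List Char) => (pvPropA l).getD acc) := by
    funext acc l
    exact pv_update_eq acc l
  rw [hfun]
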